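-- pv_equiv track=rewrite | github.com/darkshapes/nnll | nnll/mir/doc_parser.py | _resolve_variable
-- ===== SOURCE A (Python) =====
-- from typing import List, Optional, Tuple
--
-- nfo = print
--
-- def _resolve_variable(reference: str, prior_text: str) -> Optional[str]:
--     """Try to find the variable from other lines / 嘗試從其他行中查找（例如多行定義）"""
--     var_name = reference
--     search = f"{var_name} ="
--
--     for line in prior_text.splitlines():
--         if search in line:
--             repo_block = line.partition(search)[2].strip().strip('"').strip("'")
--             index = repo_block.find('"')
--             repo_id = repo_block[:index] if index != -1 else repo_block
--             if repo_id:  # Keep trying if empty"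
--                 return repo_id
--
--     for line in prior_text.splitlines():
--         if var_name in line:
--             start_index = line.find(var_name)
--             end_index = line.find("=", start_index)
--             if end_index != -1:
--                 repo_block = line[end_index + 1 :].strip().strip('"').strip("'")
--                 index = repo_block.find('"')
--                 repo_id = repo_block[:index] if index != -1 else repo_block
--                 if repo_id:
--                     return repo_id
--
--     nfo(f"Warning: {search} not found in docstring.")
--     return None
-- ===== SOURCE B (Python) =====
-- nfo = print
--
--
-- def _clean(block):
--     repo_block = block.strip().strip('"').strip("'")
--     index = repo_block.find('"')
--     return repo_block[:index] if index != -1 else repo_block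
--
--
-- def _exact_candidate(line, search):
--     if search in line:
--         repo_id = _clean(line.partition(search)[2])
--         if repo_id:
--             return repo_id
--     return None
--
--
-- def _fallback_candidate(line, var_name):
--     if var_name in line:
--         end_index = line.find("=", line.find(var_name))
--         if end_index != -1:
--             repo_id = _clean(line[end_index + 1:])
--             if repo_id:
--                 return repo_id
--     return None
--
--
-- def _resolve_variable(reference, prior_text):
--     """Single pass: return the first exact 'var =' hit immediately; remember the
--     first fallback candidate and return it after the loop."""
--     search = f"{reference} ="
--     fallback = None
--     for line in prior_text.splitlines():
--         repo_id = _exact_candidate(line, search)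
--         if repo_id is not None:
--             return repo_id
--         if fallback is None:
--             fallback = _fallback_candidate(line, reference)
--     if fallback is None:
--         nfo(f"Warning: {search} not found in docstring.")
--     return fallback
-- ===== Notes on version B (the rewrite author's own statement) =====
-- stated objective: simpler
-- what changed: Replaces A's two sequential scans over prior_text.splitlines() with one single pass whose per-line exact/fallback extraction is factored into small helpers: an exact hit returns immediately, the first fallback candidate is remembered and returned after the loop.
import Mathlib
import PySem

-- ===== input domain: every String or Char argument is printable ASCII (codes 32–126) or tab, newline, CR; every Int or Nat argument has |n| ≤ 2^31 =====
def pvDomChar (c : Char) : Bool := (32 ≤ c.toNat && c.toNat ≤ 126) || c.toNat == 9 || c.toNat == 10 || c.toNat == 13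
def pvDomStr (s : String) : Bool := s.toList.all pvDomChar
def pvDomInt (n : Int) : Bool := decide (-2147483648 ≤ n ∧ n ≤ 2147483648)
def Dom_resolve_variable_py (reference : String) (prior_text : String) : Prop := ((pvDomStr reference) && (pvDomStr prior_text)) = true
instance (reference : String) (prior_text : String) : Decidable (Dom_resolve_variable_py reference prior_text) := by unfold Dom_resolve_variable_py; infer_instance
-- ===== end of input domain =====

-- B changes structure only: one pass instead of A's two scans, extraction factored
-- into helpers; the equivalence below is about the RETURN value only (A/B also
-- print a warning when no value is found; that side effect is not modelled).

-- ===== PORT A =====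
-- first loop of A: exact 'var =' match, return first nonempty cleaned value
def pvLoopExactA (search : String) : List String → Option String
  | [] => none
  | line :: rest =>
    if PySem.Str.isIn search line then
      -- line.partition(search)[2]
      let i := PySem.Str.find line search
      let part2 := if i != -1 then PySem.Str.slice line (some (i + (PySem.Str.len search : Int))) none else ""
      let repo_block := PySem.Str.stripChars (PySem.Str.stripChars (PySem.Str.strip part2) "\"") "'"
      let index := PySem.Str.find repo_block "\""
      let repo_id := if index != -1 then PySem.Str.slice repo_block none (some index) else repo_block
      if repo_id != "" then some repo_id else pvLoopExactA search rest
    else pvLoopExactA search rest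

-- second loop of A: fallback '=' after var_name
def pvLoopFallbackA (var_name : String) : List String → Option String
  | [] => none
  | line :: rest =>
    if PySem.Str.isIn var_name line then
      let start_index := PySem.Str.find line var_name
      let end_index := PySem.Str.findFrom line "=" start_index
      if end_index != -1 then
        let repo_block := PySem.Str.stripChars (PySem.Str.stripChars (PySem.Str.strip (PySem.Str.slice line (some (end_index + 1)) none)) "\"") "'"
        let index := PySem.Str.find repo_block "\""
        let repo_id := if index != -1 then PySem.Str.slice repo_block none (some index) else repo_block
        if repo_id != "" then some repo_id else pvLoopFallbackA var_name rest
      else pvLoopFallbackA var_name rest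
    else pvLoopFallbackA var_name rest

def resolve_variable_py (reference : String) (prior_text : String) : Option String :=
  let var_name := reference
  let search := var_name ++ " ="
  let lines := PySem.Str.splitlines prior_text
  match pvLoopExactA search lines with
  | some r => some r
  | none => pvLoopFallbackA var_name lines

-- ===== PORT B =====
-- _clean(block)
def pvClean (block : String) : String :=
  let repo_block := PySem.Str.stripChars (PySem.Str.stripChars (PySem.Str.strip block) "\"") "'"
  let index := PySem.Str.find repo_block "\""
  if index != -1 then PySem.Str.slice repo_block none (some index) else repo_block

-- _exact_candidate(line, search)
def pvExactCand (line : String) (search : String) : Option String :=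
  if PySem.Str.isIn search line then
    -- line.partition(search)[2]
    let i := PySem.Str.find line search
    let part2 := if i != -1 then PySem.Str.slice line (some (i + (PySem.Str.len search : Int))) none else ""
    let repo_id := pvClean part2
    if repo_id != "" then some repo_id else none
  else none

-- _fallback_candidate(line, var_name)
def pvFallbackCand (line : String) (var_name : String) : Option String :=
  if PySem.Str.isIn var_name line then
    let end_index := PySem.Str.findFrom line "=" (PySem.Str.find line var_name)
    if end_index != -1 then
      let repo_id := pvClean (PySem.Str.slice line (some (end_index + 1)) none)
      if repo_id != "" then some repo_id else none
    else none
  else none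

-- the single loop, carrying the remembered fallback
def pvGoB (var_name : String) (search : String) : List String → Option String → Option String
  | [], fallback => fallback
  | line :: rest, fallback =>
    match pvExactCand line search with
    | some r => some r
    | none =>
      pvGoB var_name search rest
        (match fallback with
         | some f => some f
         | none => pvFallbackCand line var_name)

def resolve_variable_py_alt (reference : String) (prior_text : String) : Option String :=
  let search := reference ++ " ="
  pvGoB reference search (PySem.Str.splitlines prior_text) none

-- ===== PRECONDITION & SPEC =====
def Spec_resolve_variable_py (reference : String) (prior_text : String) (out : Option String) : Prop := out = resolve_variable_py_alt reference prior_text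
instance (reference : String) (prior_text : String) (out : Option String) : Decidable (Spec_resolve_variable_py reference prior_text out) := by unfold Spec_resolve_variable_py; infer_instance

-- ===== CLAIM (what is proved, stated in full; the proofs are below) =====
def Claim_equal_resolve_variable_py : Prop := ∀ (reference : String) (prior_text : String), Dom_resolve_variable_py reference prior_text → Spec_resolve_variable_py reference prior_text (resolve_variable_py reference prior_text)

-- ===== LEMMAS AND PROOFS =====

-- A's first loop steps by B's exact-candidate extraction
lemma loopExactA_cons (search line : String) (rest : List String) :
    pvLoopExactA search (line :: rest) =
      match pvExactCand line search with
      | some r => some r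
      | none => pvLoopExactA search rest := by
  simp only [pvLoopExactA, pvExactCand, pvClean]
  split_ifs <;> rfl

-- A's second loop steps by B's fallback-candidate extraction
lemma loopFallbackA_cons (var_name line : String) (rest : List String) :
    pvLoopFallbackA var_name (line :: rest) =
      match pvFallbackCand line var_name with
      | some r => some r
      | none => pvLoopFallbackA var_name rest := by
  simp only [pvLoopFallbackA, pvFallbackCand, pvClean]
  split_ifs <;> rfl

-- the single pass computes exact-first, then the carried fallback, then A's fallback scan
lemma goB_eq (var_name search : String) (lines : List String) (fb : Option String) :
    pvGoB var_name search lines fb =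
      match pvLoopExactA search lines with
      | some r => some r
      | none =>
        match fb with
        | some f => some f
        | none => pvLoopFallbackA var_name lines := by
  induction lines generalizing fb with
  | nil => cases fb <;> simp [pvGoB, pvLoopExactA, pvLoopFallbackA]
  | cons line rest ih =>
    rw [loopExactA_cons]
    simp only [pvGoB]
    cases hE : pvExactCand line search with
    | some r => simp
    | none =>
      rw [ih]
      cases fb with
      | some f => rfl
      | none =>
        rw [loopFallbackA_cons]

-- ===== VERDICT (by name: the statement is the Claim_ definition above) =====
theorem resolve_variable_py_spec : Claim_equal_resolve_variable_py := by
  intro reference prior_text _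
  unfold Spec_resolve_variable_py resolve_variable_py resolve_variable_py_alt
  rw [goB_eq]
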